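-- pv_equiv track=rewrite | github.com/DuhoeKim/Algoritm | 2022/0209/Programmers/전화번호목록/s3.py | solution
-- ===== SOURCE A (Python) =====
-- def solution(phone_book):
--     answer = True
--     check = dict()
--     for number in phone_book:
--         check[number] = 1
--     for number in phone_book:
--         tmp = ''
--         for n in number:
--             tmp += n
--             if check.get(tmp) and tmp != number:
--                 return False
--     return answer
-- ===== SOURCE B (Python) =====
-- def solution(phone_book):
--     book = sorted(phone_book)
--     for a, b in zip(book, book[1:]):
--         if a and a != b and b.startswith(a):
--             return False
--     return True
-- ===== Notes on version B (the rewrite author's own statement) =====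
-- stated objective: idiomatic
-- what changed: Replaced A's hash-dict of all numbers plus a per-number incremental prefix rescan with the classic idiomatic strategy: sort a copy of the list and test only consecutive pairs for a proper-prefix relation.
import Mathlib
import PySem

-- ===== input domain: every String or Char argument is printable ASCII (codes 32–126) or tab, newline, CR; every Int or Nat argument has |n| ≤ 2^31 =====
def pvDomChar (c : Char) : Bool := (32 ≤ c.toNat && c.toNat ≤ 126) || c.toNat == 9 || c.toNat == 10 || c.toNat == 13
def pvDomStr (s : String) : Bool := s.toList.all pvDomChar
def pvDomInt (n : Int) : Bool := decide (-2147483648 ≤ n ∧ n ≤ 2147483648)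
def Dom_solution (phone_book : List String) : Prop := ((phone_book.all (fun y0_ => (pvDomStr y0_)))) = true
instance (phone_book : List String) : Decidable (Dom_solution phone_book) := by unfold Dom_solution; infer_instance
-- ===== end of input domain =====

-- B replaces A's hash-dict plus per-number prefix rescans with the idiomatic sort-then-adjacent-pass strategy.


-- ===== PORT A =====
/-- Python truthiness of `check.get(tmp)` (None or an int). -/
def pyTruthyOptInt : Option Int → Bool
  | none => false
  | some v => v != 0

/-- A's inner `for n in number` loop: `tmp += n`, early `return False` when the test fires. -/
def solInner (check : PySem.Dict String Int) (number : String) : List Char → List Char → Bool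
  | [], _ => true
  | c :: rest, tmp =>
    let tmp' := tmp ++ [c]
    if pyTruthyOptInt (check.get? (String.ofList tmp')) && String.ofList tmp' != number then false
    else solInner check number rest tmp'

/-- A's second `for number in phone_book` loop. -/
def solOuter (check : PySem.Dict String Int) : List String → Bool
  | [] => true
  | number :: rest =>
    if solInner check number number.toList [] then solOuter check rest else false

def solution (phone_book : List String) : Bool :=
  let check := phone_book.foldl (fun d number => d.insert number 1) PySem.Dict.empty
  solOuter check phone_book

-- ===== PORT B =====
/-- B's `for a, b in zip(book, book[1:])` loop. -/
def altLoop : List (String × String) → Bool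
  | [] => true
  | (a, b) :: rest =>
    if a != "" && a != b && PySem.Str.startswith b a then false
    else altLoop rest

def solution_alt (phone_book : List String) : Bool :=
  let book := PySem.List.sorted phone_book (fun x => x) false
  altLoop (book.zip (PySem.List.slice book (some 1) none))

-- ===== PRECONDITION & SPEC =====
def Spec_solution (phone_book : List String) (out : Bool) : Prop := out = solution_alt phone_book
instance (phone_book : List String) (out : Bool) : Decidable (Spec_solution phone_book out) := by unfold Spec_solution; infer_instance

-- ===== CLAIM (what is proved, stated in full; the proofs are below) =====
def Claim_equal_solution : Prop := ∀ (phone_book : List String), Dom_solution phone_book → Spec_solution phone_book (solution phone_book)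

-- ===== LEMMAS AND PROOFS =====

/-- Both programs return False exactly when some nonempty member is a proper prefix of another member. -/
def bad (l : List String) : Prop :=
  ∃ x ∈ l, ∃ y ∈ l, x ≠ "" ∧ x ≠ y ∧ x.toList <+: y.toList

-- --- generic lex-order facts on List Char ---

lemma lex_of_prefix_ne {x z : List Char} (h : x <+: z) (hne : x ≠ z) :
    List.Lex (· < ·) x z := by
  induction x generalizing z with
  | nil =>
    cases z with
    | nil => exact absurd rfl hne
    | cons c z' => exact List.Lex.nil
  | cons a x' ih =>
    obtain ⟨t, rfl⟩ := h
    exact List.Lex.cons (ih (List.prefix_append x' t)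
      (fun he => hne (congrArg (List.cons a) he)))

lemma prefix_sandwich {x s z : List Char} (h : x <+: z)
    (hsx : ¬ List.Lex (· < ·) s x) (hzs : ¬ List.Lex (· < ·) z s) : x <+: s := by
  induction x generalizing s z with
  | nil => exact List.nil_prefix
  | cons a x' ih =>
    cases z with
    | nil => exact absurd h (by simp)
    | cons a' z' =>
      obtain ⟨he, hxz⟩ : a = a' ∧ x' <+: z' := by
        obtain ⟨t, ht⟩ := h
        injection ht with he1 he2
        exact ⟨he1, ⟨t, he2⟩⟩
      subst he
      cases s with
      | nil => exact absurd List.Lex.nil hsx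
      | cons b s' =>
        rcases lt_trichotomy a b with hab | hab | hab
        · exact absurd (List.Lex.rel hab) hzs
        · subst hab
          exact List.cons_prefix_cons.mpr ⟨rfl,
            ih hxz (fun hl => hsx (List.Lex.cons hl)) (fun hl => hzs (List.Lex.cons hl))⟩
        · exact absurd (List.Lex.rel hab) hsx

lemma string_lt_iff (s t : String) : s < t ↔ List.Lex (· < ·) s.toList t.toList := by
  rw [String.lt_iff_toList_lt]
  exact List.lt_iff_lex_lt _ _

lemma string_proper_prefix_lt {x y : String} (h : x.toList <+: y.toList) (hne : x ≠ y) :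
    x < y :=
  (string_lt_iff x y).mpr
    (lex_of_prefix_ne h
      (fun he => hne (by simpa [String.ofList_toList] using congrArg String.ofList he)))

lemma string_prefix_sandwich {x s y : String} (h : x.toList <+: y.toList)
    (h1 : x ≤ s) (h2 : s ≤ y) : x.toList <+: s.toList :=
  prefix_sandwich h
    (fun hl => (not_lt.mpr h1) ((string_lt_iff s x).mpr hl))
    (fun hl => (not_lt.mpr h2) ((string_lt_iff y s).mpr hl))

-- --- A-side characterisation ---

lemma check_get? (l : List String) (d : PySem.Dict String Int) (s : String) :
    (l.foldl (fun d n => d.insert n 1) d).get? s =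
      if s ∈ l then some 1 else d.get? s := by
  induction l generalizing d with
  | nil => simp
  | cons n rest ih =>
    simp only [List.foldl_cons, ih, List.mem_cons, PySem.Dict.get?_insert]
    by_cases hr : s ∈ rest <;> by_cases hn : s = n <;> simp [hr, hn]

lemma inner_false_iff (check : PySem.Dict String Int) (number : String)
    (cs tmp : List Char) :
    solInner check number cs tmp = false ↔
      ∃ e, e ≠ [] ∧ e <+: cs ∧
        pyTruthyOptInt (check.get? (String.ofList (tmp ++ e))) = true ∧
        String.ofList (tmp ++ e) ≠ number := by
  induction cs generalizing tmp with
  | nil =>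
    simp only [solInner]
    constructor
    · intro h; cases h
    · rintro ⟨e, hne, hpre, -⟩
      exact absurd (List.prefix_nil.mp hpre) hne
  | cons c rest ih =>
    simp only [solInner]
    cases hcond : pyTruthyOptInt (check.get? (String.ofList (tmp ++ [c]))) &&
        (String.ofList (tmp ++ [c]) != number) with
    | true =>
      rw [Bool.and_eq_true, bne_iff_ne] at hcond
      rw [if_pos rfl]
      exact iff_of_true rfl ⟨[c], by simp, by simp, hcond.1, hcond.2⟩
    | false =>
      have hhit : ¬(pyTruthyOptInt (check.get? (String.ofList (tmp ++ [c]))) = true ∧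
          String.ofList (tmp ++ [c]) ≠ number) := by
        rintro ⟨h1, h2⟩
        rw [h1, bne_iff_ne.mpr h2] at hcond
        cases hcond
      rw [if_neg (by simp), ih]
      constructor
      · rintro ⟨e, hne, hpre, ht, hne2⟩
        exact ⟨c :: e, by simp, List.cons_prefix_cons.mpr ⟨rfl, hpre⟩,
          by simpa [List.append_assoc] using ht,
          by simpa [List.append_assoc] using hne2⟩
      · rintro ⟨e, hne, hpre, ht, hne2⟩
        cases e with
        | nil => exact absurd rfl hne
        | cons e0 e' =>
          obtain ⟨rfl, hpre'⟩ := List.cons_prefix_cons.mp hpre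
          cases e' with
          | nil => exact absurd ⟨ht, hne2⟩ hhit
          | cons e1 e'' =>
            exact ⟨e1 :: e'', by simp, hpre',
              by simpa [List.append_assoc] using ht,
              by simpa [List.append_assoc] using hne2⟩

lemma outer_false_iff (check : PySem.Dict String Int) (l : List String) :
    solOuter check l = false ↔
      ∃ number ∈ l, solInner check number number.toList [] = false := by
  induction l with
  | nil => simp [solOuter]
  | cons n rest ih =>
    simp only [solOuter]
    cases h : solInner check n n.toList [] with
    | true => simp [ih, h]
    | false =>
      rw [if_neg (by simp)]
      exact iff_of_true rfl ⟨n, List.mem_cons_self, h⟩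

lemma A_false_iff (l : List String) : solution l = false ↔ bad l := by
  unfold solution bad
  rw [outer_false_iff]
  constructor
  · rintro ⟨number, hnum, hinner⟩
    obtain ⟨e, hene, hpre, ht, hne2⟩ := (inner_false_iff _ _ _ _).mp hinner
    rw [List.nil_append] at ht hne2
    rw [check_get?] at ht
    have hmem : String.ofList e ∈ l := by
      by_contra hm
      simp [hm, pyTruthyOptInt] at ht
    refine ⟨String.ofList e, hmem, number, hnum, ?_, hne2, ?_⟩
    · intro h
      apply hene
      have := congrArg String.toList h
      simpa [String.toList_ofList] using this
    · simpa [String.toList_ofList] using hpre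
  · rintro ⟨x, hx, y, hy, hxe, hxy, hpre⟩
    refine ⟨y, hy, (inner_false_iff _ _ _ _).mpr ⟨x.toList, ?_, hpre, ?_, ?_⟩⟩
    · intro h
      exact hxe (by simpa using congrArg String.ofList h)
    · rw [List.nil_append, String.ofList_toList, check_get?]
      simp [hx, pyTruthyOptInt]
    · rw [List.nil_append, String.ofList_toList]
      exact hxy

-- --- B-side characterisation ---

lemma altLoop_false_exists {ps : List (String × String)} (h : altLoop ps = false) :
    ∃ a b, (a, b) ∈ ps ∧ a ≠ "" ∧ a ≠ b ∧ PySem.Str.startswith b a = true := by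
  induction ps with
  | nil => simp [altLoop] at h
  | cons p rest ih =>
    obtain ⟨pa, pb⟩ := p
    simp only [altLoop] at h
    by_cases hc : (pa != "" && pa != pb && PySem.Str.startswith pb pa) = true
    · obtain ⟨⟨h1, h2⟩, h3⟩ := by simpa [Bool.and_eq_true] using hc
      exact ⟨pa, pb, List.mem_cons_self, h1, h2, h3⟩
    · rw [if_neg (by simpa using hc)] at h
      obtain ⟨a, b, hm, h1, h2, h3⟩ := ih h
      exact ⟨a, b, List.mem_cons_of_mem _ hm, h1, h2, h3⟩

lemma adj_of_bad {S : List String} (hsort : S.Pairwise (· ≤ ·))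
    {x y : String} (hx : x ∈ S) (hy : y ∈ S) (hne : x ≠ "") (hxy : x ≠ y)
    (hpre : x.toList <+: y.toList) :
    altLoop (S.zip (S.drop 1)) = false := by
  have hxy_lt : x < y := string_proper_prefix_lt hpre hxy
  induction S with
  | nil => cases hx
  | cons a rest ih =>
    obtain ⟨ha, hrest⟩ := List.pairwise_cons.mp hsort
    cases rest with
    | nil =>
      rw [List.mem_singleton] at hx hy
      exact absurd (hx.trans hy.symm) hxy
    | cons b rest' =>
      simp only [List.drop_succ_cons, List.drop_zero, List.zip_cons_cons]
      have hstep : altLoop ((b :: rest').zip rest') = false →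
          altLoop ((a, b) :: (b :: rest').zip rest') = false := by
        intro hr
        simp only [altLoop]
        split
        · rfl
        · exact hr
      have hrec : x ∈ b :: rest' → y ∈ b :: rest' → altLoop ((a, b) :: (b :: rest').zip rest') = false := by
        intro hx' hy'
        exact hstep (by simpa using ih hrest hx' hy')
      by_cases hxa : x = a
      · have hya : y ≠ a := fun h => hxy (hxa.trans h.symm)
        have hy' : y ∈ b :: rest' := by
          rcases List.mem_cons.mp hy with h | h
          · exact absurd h hya
          · exact h
        have hby : b ≤ y := by
          rcases List.mem_cons.mp hy' with h | h
          · exact le_of_eq h.symm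
          · exact (List.pairwise_cons.mp hrest).1 y h
        by_cases hab : a = b
        · exact hrec (by rw [hxa, hab]; exact List.mem_cons_self) hy'
        · have hxb : x ≤ b := by rw [hxa]; exact ha b List.mem_cons_self
          have hprefb : x.toList <+: b.toList := string_prefix_sandwich hpre hxb hby
          have hsw : PySem.Str.startswith b a = true := by
            rw [PySem.Str.startswith_eq]
            exact (PySem.Chars.startswith_iff _ _).mpr (hxa ▸ hprefb)
          have hsw' : PySem.Chars.startswith b.toList a.toList = true := by
            rw [← PySem.Str.startswith_eq]; exact hsw
          simp only [altLoop]
          rw [if_pos (by simp [bne_iff_ne.mpr (hxa ▸ hne), bne_iff_ne.mpr hab, hsw'])]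
      · have hx' : x ∈ b :: rest' := by
          rcases List.mem_cons.mp hx with h | h
          · exact absurd h hxa
          · exact h
        have hy' : y ∈ b :: rest' := by
          rcases List.mem_cons.mp hy with h | h
          · exact absurd (ha x hx') (show x < a from h ▸ hxy_lt).not_ge
          · exact h
        exact hrec hx' hy'

lemma B_false_iff (l : List String) : solution_alt l = false ↔ bad l := by
  have hdrop : PySem.List.slice (PySem.List.sorted l (fun x => x) false) (some 1) none =
      (PySem.List.sorted l (fun x => x) false).drop 1 := by
    simp [pysem]
  show altLoop ((PySem.List.sorted l (fun x => x) false).zip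
      (PySem.List.slice (PySem.List.sorted l (fun x => x) false) (some 1) none)) = false ↔ bad l
  rw [hdrop]
  constructor
  · intro h
    obtain ⟨a, b, hm, h1, h2, h3⟩ := altLoop_false_exists h
    obtain ⟨hma, hmb⟩ := List.of_mem_zip hm
    refine ⟨a, ?_, b, ?_, h1, h2, ?_⟩
    · exact (PySem.List.mem_sorted _ _ _ _).mp hma
    · exact (PySem.List.mem_sorted _ _ _ _).mp (List.mem_of_mem_drop hmb)
    · rw [PySem.Str.startswith_eq] at h3
      exact (PySem.Chars.startswith_iff _ _).mp h3
  · rintro ⟨x, hx, y, hy, h1, h2, h3⟩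
    exact adj_of_bad
      (by simpa using PySem.List.sorted_pairwise l (fun x => x))
      ((PySem.List.mem_sorted _ _ _ _).mpr hx) ((PySem.List.mem_sorted _ _ _ _).mpr hy) h1 h2 h3

-- ===== VERDICT (by name: the statement is the Claim_ definition above) =====
theorem solution_spec : Claim_equal_solution := by
  intro phone_book _
  unfold Spec_solution
  cases hA : solution phone_book <;> cases hB : solution_alt phone_book
  · rfl
  · exact absurd ((A_false_iff _).mp hA) (fun hb => by
      rw [(B_false_iff _).mpr hb] at hB; cases hB)
  · exact absurd ((B_false_iff _).mp hB) (fun hb => by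
      rw [(A_false_iff _).mpr hb] at hA; cases hA)
  · rfl
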